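-- pv_equiv track=rewrite | github.com/QingbiaoLi/leetcode-top100-liked-questions | teach_kids_coding/day_15_bfs.py | methodOne
-- ===== SOURCE A (Python) =====
-- def methodOne(n, s) -> int:
--     seen = set()
--     if len(n) == 0:
--         return False
--     q = [s]
--     while len(q)>0:
--         curr = q.pop(0)
--         if n[curr] == 0:
--             return True
--
--         for i in [-1, 1]:
--             next = curr + i*n[curr]
--             if next not in seen and next >= 0 and next < len(n):
--                 seen.add(next)
--                 q.append(next)
--     return False
-- ===== SOURCE B (Python) =====
-- def methodOne(n, s):
--     # Frontier-saturation reachability: expand whole frontiers as sets until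
--     # no new index appears, then scan the reachable set for a zero cell.
--     if len(n) == 0:
--         return False
--     reach = {s}
--     frontier = {s}
--     while frontier:
--         new = set()
--         for i in frontier:
--             v = n[i]
--             for j in (i - v, i + v):
--                 if 0 <= j < len(n) and j not in reach:
--                     new.add(j)
--         reach |= new
--         frontier = new
--     return any(n[i] == 0 for i in reach)
-- ===== Notes on version B (the rewrite author's own statement) =====
-- stated objective: alternative
-- what changed: Replaces A's FIFO-queue BFS (pop(0) with a per-node early True on a zero cell) with set-based frontier saturation: whole frontiers are expanded at once into a reachable set until it stops growing, and the zero test becomes one final scan over the reachable set.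
import Mathlib
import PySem

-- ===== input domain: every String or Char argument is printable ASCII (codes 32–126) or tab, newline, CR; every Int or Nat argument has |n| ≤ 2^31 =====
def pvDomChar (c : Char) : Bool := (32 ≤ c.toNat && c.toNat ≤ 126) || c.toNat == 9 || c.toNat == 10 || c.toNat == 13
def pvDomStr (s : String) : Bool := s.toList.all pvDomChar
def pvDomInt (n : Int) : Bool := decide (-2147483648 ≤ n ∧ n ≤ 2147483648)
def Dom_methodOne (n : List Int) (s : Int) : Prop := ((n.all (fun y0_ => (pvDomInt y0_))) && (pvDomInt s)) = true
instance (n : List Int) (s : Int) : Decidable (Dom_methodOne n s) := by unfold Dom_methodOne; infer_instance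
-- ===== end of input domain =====

-- B replaces A's queue-based BFS with set-based frontier saturation plus a final zero scan; objective: alternative.
-- (Return-value equivalence; neither program mutates its arguments.)

-- n[c] in total form: exact wherever Python's n[c] returns (Pre_ puts the start index in range;
-- every other visited index is guarded by 0 ≤ j < len(n) in both programs).
def pvVal (n : List Int) (c : Int) : Int := (PySem.List.pyGet? n c).getD 0

-- ===== PORT A =====
-- body of A's 'for i in [-1, 1]' loop over the state (q, seen)
def pvStep (n : List Int) (curr : Int) (st : List Int × PySem.Set Int) (i : Int) :
    List Int × PySem.Set Int :=
  let next := curr + i * pvVal n curr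
  if ¬ next ∈ st.2 ∧ 0 ≤ next ∧ next < (n.length : Int) then
    (st.1 ++ [next], PySem.Set.add st.2 next)
  else st

-- A's while loop; fuel n.length + 1 bounds the number of iterations (proved below)
def methodOneLoop (n : List Int) (q : List Int) (seen : PySem.Set Int) (fuel : Nat) : Bool :=
  match fuel, q with
  | 0, _ => false
  | _ + 1, [] => false
  | fuel + 1, curr :: q' =>
    if pvVal n curr = 0 then true
    else
      let st := [(-1 : Int), 1].foldl (pvStep n curr) (q', seen)
      methodOneLoop n st.1 st.2 fuel

def methodOne (n : List Int) (s : Int) : Bool :=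
  if n.length = 0 then false
  else methodOneLoop n [s] PySem.Set.empty (n.length + 1)

-- ===== PORT B =====
-- body of B's 'if 0 <= j < len(n) and j not in reach: new.add(j)'
def pvAdd (n : List Int) (reach : PySem.Set Int) (new : PySem.Set Int) (j : Int) : PySem.Set Int :=
  if 0 ≤ j ∧ j < (n.length : Int) ∧ ¬ j ∈ reach then PySem.Set.add new j else new

-- body of B's 'for i in frontier' loop: v = n[i]; for j in (i - v, i + v): …
def pvBody (n : List Int) (reach : PySem.Set Int) (new : PySem.Set Int) (i : Int) :
    PySem.Set Int :=
  let v := pvVal n i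
  [i - v, i + v].foldl (pvAdd n reach) new

-- one round: the set of in-range neighbours of the frontier that are not yet reached
def altExpand (n : List Int) (frontier : List Int) (reach : PySem.Set Int) : PySem.Set Int :=
  frontier.foldl (pvBody n reach) PySem.Set.empty

-- B's while loop; fuel n.length + 2 bounds the number of rounds (proved below)
def altLoop (n : List Int) (reach frontier : PySem.Set Int) (fuel : Nat) : PySem.Set Int :=
  match fuel, frontier with
  | 0, _ => reach
  | _ + 1, [] => reach
  | fuel + 1, _ =>
    let new := altExpand n frontier reach
    altLoop n (PySem.Set.union reach new) new fuel

def methodOne_alt (n : List Int) (s : Int) : Bool :=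
  if n.length = 0 then false
  else
    (altLoop n (PySem.Set.add PySem.Set.empty s) (PySem.Set.add PySem.Set.empty s)
        (n.length + 2)).any (fun i => pvVal n i == 0)

-- ===== PRECONDITION & SPEC =====
-- Pre_ excludes only inputs where A raises IndexError: a start index outside Python's
-- (wraparound) index range of a nonempty list.
def Pre_methodOne (n : List Int) (s : Int) : Prop :=
  n = [] ∨ (-(n.length : Int) ≤ s ∧ s < (n.length : Int))
instance (n : List Int) (s : Int) : Decidable (Pre_methodOne n s) := by
  unfold Pre_methodOne; infer_instance

def pvWitness_methodOne : List Int × Int := ([3, 1, 0], 0)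

def Spec_methodOne (n : List Int) (s : Int) (out : Bool) : Prop := out = methodOne_alt n s
instance (n : List Int) (s : Int) (out : Bool) : Decidable (Spec_methodOne n s out) := by
  unfold Spec_methodOne; infer_instance

-- ===== CLAIM (what is proved, stated in full; the proofs are below) =====
def Claim_equal_methodOne : Prop :=
  ∀ (n : List Int) (s : Int), Dom_methodOne n s → Pre_methodOne n s →
    Spec_methodOne n s (methodOne n s)

-- ===== LEMMAS AND PROOFS =====

-- reachability in the jump graph: s, closed under in-range jumps x ↦ x ± n[x]
inductive pvReach (n : List Int) (s : Int) : Int → Prop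
  | base : pvReach n s s
  | step (c j : Int) : pvReach n s c → (j = c - pvVal n c ∨ j = c + pvVal n c) →
      0 ≤ j → j < (n.length : Int) → pvReach n s j

-- ---- counting lemmas ----
theorem pvNodupLen (l : List Int) (m : Nat) (hnd : l.Nodup)
    (h : ∀ x ∈ l, 0 ≤ x ∧ x < (m : Int)) : l.length ≤ m := by
  have hsub : l.toFinset ⊆ Finset.Ico (0 : ℤ) m := by
    intro x hx
    rw [List.mem_toFinset] at hx
    have := h x hx
    simp [Finset.mem_Ico]
    omega
  have hc := Finset.card_le_card hsub
  rw [List.toFinset_card_of_nodup hnd, Int.card_Ico] at hc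
  omega

theorem pvNodupLenS (l : List Int) (m : Nat) (s : Int) (hnd : l.Nodup)
    (h : ∀ x ∈ l, x = s ∨ (0 ≤ x ∧ x < (m : Int))) : l.length ≤ m + 1 := by
  have hsub : l.toFinset ⊆ insert s (Finset.Ico (0 : ℤ) m) := by
    intro x hx
    rw [List.mem_toFinset] at hx
    rcases h x hx with h1 | h2
    · simp [h1]
    · simp [Finset.mem_Ico]
      omega
  have hc := Finset.card_le_card hsub
  rw [List.toFinset_card_of_nodup hnd] at hc
  have := Finset.card_insert_le s (Finset.Ico (0 : ℤ) m)
  rw [Int.card_Ico] at this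
  omega

theorem pvUnionLen (s t : PySem.Set Int) (hnd : s.Nodup) (x : Int)
    (hx : x ∈ t) (hxs : x ∉ s) : s.length + 1 ≤ (PySem.Set.union s t).length := by
  have hu : (PySem.Set.union s t).Nodup := PySem.Set.nodup_union _ _ hnd
  have hsub : insert x s.toFinset ⊆ (PySem.Set.union s t).toFinset := by
    intro y hy
    rw [Finset.mem_insert] at hy
    rw [List.mem_toFinset, PySem.Set.mem_union]
    rcases hy with rfl | hy
    · exact Or.inr hx
    · exact Or.inl (List.mem_toFinset.mp hy)
  have hc := Finset.card_le_card hsub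
  rw [Finset.card_insert_of_notMem (by simpa using hxs),
      List.toFinset_card_of_nodup hnd, List.toFinset_card_of_nodup hu] at hc
  omega

-- ---- pvStep lemmas (A's conditional enqueue) ----
theorem pvStep_fst_sub (n : List Int) (curr : Int) (st : List Int × PySem.Set Int) (i x : Int)
    (hx : x ∈ st.1) : x ∈ (pvStep n curr st i).1 := by
  unfold pvStep; dsimp only
  split_ifs with h
  · exact List.mem_append_left _ hx
  · exact hx

theorem pvStep_snd_sub (n : List Int) (curr : Int) (st : List Int × PySem.Set Int) (i x : Int)
    (hx : x ∈ st.2) : x ∈ (pvStep n curr st i).2 := by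
  unfold pvStep; dsimp only
  split_ifs with h
  · exact (PySem.Set.mem_add _ _ _).mpr (Or.inl hx)
  · exact hx

theorem pvStep_mem_fst (n : List Int) (curr : Int) (st : List Int × PySem.Set Int) (i x : Int)
    (hx : x ∈ (pvStep n curr st i).1) :
    x ∈ st.1 ∨ (x = curr + i * pvVal n curr ∧ 0 ≤ x ∧ x < (n.length : Int)) := by
  unfold pvStep at hx; dsimp only at hx
  split_ifs at hx with h
  · rcases List.mem_append.mp hx with h1 | h1
    · exact Or.inl h1
    · have : x = curr + i * pvVal n curr := List.mem_singleton.mp h1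
      subst this
      exact Or.inr ⟨rfl, h.2.1, h.2.2⟩
  · exact Or.inl hx

theorem pvStep_mem_snd (n : List Int) (curr : Int) (st : List Int × PySem.Set Int) (i x : Int)
    (hx : x ∈ (pvStep n curr st i).2) :
    x ∈ st.2 ∨ (x ∈ (pvStep n curr st i).1 ∧ 0 ≤ x ∧ x < (n.length : Int)) := by
  unfold pvStep at hx ⊢; dsimp only at hx ⊢
  split_ifs at hx with h
  · rcases (PySem.Set.mem_add _ _ _).mp hx with h1 | h1
    · exact Or.inl h1
    · subst h1
      refine Or.inr ⟨?_, h.2.1, h.2.2⟩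
      simp [h]
  · exact Or.inl hx

theorem pvStep_nbr_mem (n : List Int) (curr : Int) (st : List Int × PySem.Set Int) (i : Int)
    (h0 : 0 ≤ curr + i * pvVal n curr) (hl : curr + i * pvVal n curr < (n.length : Int)) :
    curr + i * pvVal n curr ∈ (pvStep n curr st i).2 := by
  unfold pvStep; dsimp only
  by_cases hm : curr + i * pvVal n curr ∈ st.2
  · split_ifs with h
    · exact (PySem.Set.mem_add _ _ _).mpr (Or.inl hm)
    · exact hm
  · rw [if_pos ⟨hm, h0, hl⟩]
    exact (PySem.Set.mem_add _ _ _).mpr (Or.inr rfl)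

theorem pvStep_nodup (n : List Int) (curr : Int) (st : List Int × PySem.Set Int) (i : Int)
    (h : st.2.Nodup) : (pvStep n curr st i).2.Nodup := by
  unfold pvStep; dsimp only
  split_ifs with hc
  · exact PySem.Set.nodup_add _ _ h
  · exact h

theorem pvStep_length (n : List Int) (curr : Int) (st : List Int × PySem.Set Int) (i : Int) :
    (pvStep n curr st i).1.length + st.2.length
      = st.1.length + (pvStep n curr st i).2.length := by
  unfold pvStep; dsimp only
  split_ifs with h
  · simp [PySem.Set.add_of_not_mem h.1]
    omega
  · rfl

-- ---- the closure argument shared by both directions ----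
theorem pvClosed_no_zero (n : List Int) (s : Int) (seen : List Int)
    (h : ∀ x, (x ∈ seen ∨ x = s) → pvVal n x ≠ 0 ∧
      ∀ j, (j = x - pvVal n x ∨ j = x + pvVal n x) → 0 ≤ j → j < (n.length : Int) → j ∈ seen) :
    ∀ x, pvReach n s x → pvVal n x ≠ 0 := by
  have hmem : ∀ x, pvReach n s x → (x ∈ seen ∨ x = s) := by
    intro x hx
    induction hx with
    | base => exact Or.inr rfl
    | step c j hc hj h0 hl ih => exact Or.inl ((h c ih).2 j hj h0 hl)
  intro x hx
  exact (h x (hmem x hx)).1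

-- ---- A's loop: soundness and exhaustion ----
theorem methodOneLoop_true (n : List Int) (s : Int) :
    ∀ (fuel : Nat) (q : List Int) (seen : PySem.Set Int),
      (∀ x ∈ q, pvReach n s x) → methodOneLoop n q seen fuel = true →
      ∃ x, pvReach n s x ∧ pvVal n x = 0 := by
  intro fuel
  induction fuel with
  | zero => intro q seen _ h; simp [methodOneLoop] at h
  | succ fuel ih =>
    intro q seen hq h
    match q with
    | [] => simp [methodOneLoop] at h
    | curr :: q' =>
      rw [methodOneLoop] at h
      by_cases hv : pvVal n curr = 0
      · exact ⟨curr, hq curr (List.mem_cons_self), hv⟩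
      · rw [if_neg hv] at h
        simp only [List.foldl] at h
        refine ih _ _ ?_ h
        intro x hx
        have hcr : pvReach n s curr := hq curr List.mem_cons_self
        rcases pvStep_mem_fst n curr _ 1 x hx with hx1 | ⟨hxe, hx0, hxl⟩
        · rcases pvStep_mem_fst n curr _ (-1) x hx1 with hx2 | ⟨hxe, hx0, hxl⟩
          · exact hq x (List.mem_cons_of_mem _ hx2)
          · exact pvReach.step curr x hcr (Or.inl (by omega)) hx0 hxl
        · exact pvReach.step curr x hcr (Or.inr (by omega)) hx0 hxl

theorem methodOneLoop_false (n : List Int) (s : Int) :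
    ∀ (fuel : Nat) (q : List Int) (seen : PySem.Set Int),
      (∀ x ∈ q, pvReach n s x) →
      (∀ x ∈ seen, 0 ≤ x ∧ x < (n.length : Int)) →
      seen.Nodup →
      (∀ x, (x ∈ seen ∨ x = s) → x ∈ q ∨ (pvVal n x ≠ 0 ∧
        ∀ j, (j = x - pvVal n x ∨ j = x + pvVal n x) → 0 ≤ j → j < (n.length : Int) →
          j ∈ seen)) →
      q.length + (n.length - seen.length) ≤ fuel →
      methodOneLoop n q seen fuel = false →
      ∀ x, pvReach n s x → pvVal n x ≠ 0 := by
  intro fuel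
  induction fuel with
  | zero =>
    intro q seen hq hr hnd hclose hfuel _
    have hqe : q = [] := by
      cases q with
      | nil => rfl
      | cons a l => simp at hfuel
    subst hqe
    refine pvClosed_no_zero n s seen (fun x hx => ?_)
    rcases hclose x hx with h1 | h1
    · simp at h1
    · exact h1
  | succ fuel ih =>
    intro q seen hq hr hnd hclose hfuel hloop
    match q with
    | [] =>
      refine pvClosed_no_zero n s seen (fun x hx => ?_)
      rcases hclose x hx with h1 | h1
      · simp at h1
      · exact h1
    | curr :: q' =>
      rw [methodOneLoop] at hloop
      by_cases hv : pvVal n curr = 0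
      · rw [if_pos hv] at hloop; simp at hloop
      · rw [if_neg hv] at hloop
        simp only [List.foldl] at hloop
        set st1 := pvStep n curr (q', seen) (-1) with hst1
        set st2 := pvStep n curr st1 1 with hst2
        have hcr : pvReach n s curr := hq curr List.mem_cons_self
        -- neighbours of curr end up in st2.2
        have hnb : ∀ j, (j = curr - pvVal n curr ∨ j = curr + pvVal n curr) →
            0 ≤ j → j < (n.length : Int) → j ∈ st2.2 := by
          intro j hj h0 hl
          rcases hj with hj | hj
          · have : j = curr + (-1) * pvVal n curr := by omega
            subst this
            exact pvStep_snd_sub n curr st1 1 _ (pvStep_nbr_mem n curr (q', seen) (-1) h0 hl)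
          · have hj1 : j = curr + 1 * pvVal n curr := by omega
            subst hj1
            exact pvStep_nbr_mem n curr st1 1 h0 hl
        refine ih st2.1 st2.2 ?_ ?_ ?_ ?_ ?_ hloop
        · -- members of the new queue are reachable
          intro x hx
          rcases pvStep_mem_fst n curr st1 1 x hx with hx1 | ⟨hxe, hx0, hxl⟩
          · rcases pvStep_mem_fst n curr (q', seen) (-1) x hx1 with hx2 | ⟨hxe, hx0, hxl⟩
            · exact hq x (List.mem_cons_of_mem _ hx2)
            · exact pvReach.step curr x hcr (Or.inl (by omega)) hx0 hxl
          · exact pvReach.step curr x hcr (Or.inr (by omega)) hx0 hxl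
        · -- members of the new seen are in range
          intro x hx
          rcases pvStep_mem_snd n curr st1 1 x hx with hx1 | ⟨_, hx0, hxl⟩
          · rcases pvStep_mem_snd n curr (q', seen) (-1) x hx1 with hx2 | ⟨_, hx0, hxl⟩
            · exact hr x hx2
            · exact ⟨hx0, hxl⟩
          · exact ⟨hx0, hxl⟩
        · exact pvStep_nodup n curr st1 1 (pvStep_nodup n curr (q', seen) (-1) hnd)
        · -- closure modulo the new queue
          intro x hx
          have hqsub : ∀ y ∈ q', y ∈ st2.1 := fun y hy =>
            pvStep_fst_sub n curr st1 1 y (pvStep_fst_sub n curr (q', seen) (-1) y hy)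
          have hssub : ∀ y ∈ seen, y ∈ st2.2 := fun y hy =>
            pvStep_snd_sub n curr st1 1 y (pvStep_snd_sub n curr (q', seen) (-1) y hy)
          have hcurr : x = curr →
              x ∈ st2.1 ∨ (pvVal n x ≠ 0 ∧ ∀ j, (j = x - pvVal n x ∨ j = x + pvVal n x) →
                0 ≤ j → j < (n.length : Int) → j ∈ st2.2) := by
            rintro rfl
            exact Or.inr ⟨hv, hnb⟩
          have hold : (x ∈ seen ∨ x = s) →
              x ∈ st2.1 ∨ (pvVal n x ≠ 0 ∧ ∀ j, (j = x - pvVal n x ∨ j = x + pvVal n x) →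
                0 ≤ j → j < (n.length : Int) → j ∈ st2.2) := by
            intro hx'
            rcases hclose x hx' with hxq | ⟨hxv, hxn⟩
            · rcases List.mem_cons.mp hxq with rfl | hxq'
              · exact hcurr rfl
              · exact Or.inl (hqsub x hxq')
            · exact Or.inr ⟨hxv, fun j hj h0 hl => hssub j (hxn j hj h0 hl)⟩
          rcases hx with hx | rfl
          · rcases pvStep_mem_snd n curr st1 1 x hx with hx1 | ⟨hxf, _, _⟩
            · rcases pvStep_mem_snd n curr (q', seen) (-1) x hx1 with hx2 | ⟨hxf, _, _⟩
              · exact hold (Or.inl hx2)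
              · exact Or.inl (pvStep_fst_sub n curr st1 1 x hxf)
            · exact Or.inl hxf
          · exact hold (Or.inr rfl)
        · -- fuel bound
          have hlen1 : st1.1.length + seen.length = q'.length + st1.2.length :=
            pvStep_length n curr (q', seen) (-1)
          have hlen2 : st2.1.length + st1.2.length = st1.1.length + st2.2.length :=
            pvStep_length n curr st1 1
          have hseenlen : seen.length ≤ n.length := pvNodupLen seen n.length hnd hr
          have hst2len : st2.2.length ≤ n.length := by
            refine pvNodupLen st2.2 n.length
              (pvStep_nodup n curr st1 1 (pvStep_nodup n curr (q', seen) (-1) hnd)) ?_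
            intro x hx
            rcases pvStep_mem_snd n curr st1 1 x hx with hx1 | ⟨_, hx0, hxl⟩
            · rcases pvStep_mem_snd n curr (q', seen) (-1) x hx1 with hx2 | ⟨_, hx0, hxl⟩
              · exact hr x hx2
              · exact ⟨hx0, hxl⟩
            · exact ⟨hx0, hxl⟩
          simp only [List.length_cons] at hfuel
          omega

-- ---- pvAdd / pvBody lemmas (B's conditional add) ----
theorem pvAdd_sub (n : List Int) (reach new : PySem.Set Int) (j x : Int)
    (hx : x ∈ new) : x ∈ pvAdd n reach new j := by
  unfold pvAdd
  split_ifs with h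
  · exact (PySem.Set.mem_add _ _ _).mpr (Or.inl hx)
  · exact hx

theorem pvAdd_mem (n : List Int) (reach new : PySem.Set Int) (j x : Int)
    (hx : x ∈ pvAdd n reach new j) :
    x ∈ new ∨ (x = j ∧ 0 ≤ x ∧ x < (n.length : Int) ∧ x ∉ reach) := by
  unfold pvAdd at hx
  split_ifs at hx with h
  · rcases (PySem.Set.mem_add _ _ _).mp hx with h1 | rfl
    · exact Or.inl h1
    · exact Or.inr ⟨rfl, h.1, h.2.1, h.2.2⟩
  · exact Or.inl hx

theorem pvAdd_self (n : List Int) (reach new : PySem.Set Int) (j : Int)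
    (h0 : 0 ≤ j) (hl : j < (n.length : Int)) (hr : j ∉ reach) :
    j ∈ pvAdd n reach new j := by
  unfold pvAdd
  rw [if_pos ⟨h0, hl, hr⟩]
  exact (PySem.Set.mem_add _ _ _).mpr (Or.inr rfl)

theorem pvBody_sub (n : List Int) (reach new : PySem.Set Int) (i x : Int)
    (hx : x ∈ new) : x ∈ pvBody n reach new i := by
  unfold pvBody; dsimp only
  simp only [List.foldl]
  exact pvAdd_sub n reach _ _ x (pvAdd_sub n reach new _ x hx)

theorem pvBody_mem (n : List Int) (reach new : PySem.Set Int) (i x : Int)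
    (hx : x ∈ pvBody n reach new i) :
    x ∈ new ∨ ((x = i - pvVal n i ∨ x = i + pvVal n i) ∧ 0 ≤ x ∧ x < (n.length : Int) ∧
      x ∉ reach) := by
  unfold pvBody at hx; dsimp only at hx
  simp only [List.foldl] at hx
  rcases pvAdd_mem n reach _ _ x hx with hx1 | ⟨hxe, h0, hl, hr⟩
  · rcases pvAdd_mem n reach _ _ x hx1 with hx2 | ⟨hxe, h0, hl, hr⟩
    · exact Or.inl hx2
    · exact Or.inr ⟨Or.inl hxe, h0, hl, hr⟩
  · exact Or.inr ⟨Or.inr hxe, h0, hl, hr⟩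

theorem pvBody_complete (n : List Int) (reach new : PySem.Set Int) (i j : Int)
    (hj : j = i - pvVal n i ∨ j = i + pvVal n i) (h0 : 0 ≤ j) (hl : j < (n.length : Int))
    (hr : j ∉ reach) : j ∈ pvBody n reach new i := by
  unfold pvBody; dsimp only
  simp only [List.foldl]
  rcases hj with rfl | rfl
  · exact pvAdd_sub n reach _ _ _ (pvAdd_self n reach new _ h0 hl hr)
  · exact pvAdd_self n reach _ _ h0 hl hr

theorem pvFold_sub (n : List Int) (reach : PySem.Set Int) (frontier : List Int) :
    ∀ (init : PySem.Set Int) (x : Int), x ∈ init →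
      x ∈ frontier.foldl (pvBody n reach) init := by
  induction frontier with
  | nil => intro init x hx; simpa using hx
  | cons f fr ih =>
    intro init x hx
    exact ih _ x (pvBody_sub n reach init f x hx)

theorem pvFold_mem (n : List Int) (reach : PySem.Set Int) (frontier : List Int) :
    ∀ (init : PySem.Set Int) (x : Int), x ∈ frontier.foldl (pvBody n reach) init →
      x ∈ init ∨ ∃ i ∈ frontier, (x = i - pvVal n i ∨ x = i + pvVal n i) ∧
        0 ≤ x ∧ x < (n.length : Int) ∧ x ∉ reach := by
  induction frontier with
  | nil => intro init x hx; simpa using hx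
  | cons f fr ih =>
    intro init x hx
    rcases ih _ x hx with hx1 | ⟨i, hi, hrest⟩
    · rcases pvBody_mem n reach init f x hx1 with hx2 | hrest
      · exact Or.inl hx2
      · exact Or.inr ⟨f, List.mem_cons_self, hrest⟩
    · exact Or.inr ⟨i, List.mem_cons_of_mem _ hi, hrest⟩

theorem pvFold_complete (n : List Int) (reach : PySem.Set Int) (frontier : List Int) :
    ∀ (init : PySem.Set Int) (i j : Int), i ∈ frontier →
      (j = i - pvVal n i ∨ j = i + pvVal n i) → 0 ≤ j → j < (n.length : Int) → j ∉ reach →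
      j ∈ frontier.foldl (pvBody n reach) init := by
  induction frontier with
  | nil => intro init i j hi; simp at hi
  | cons f fr ih =>
    intro init i j hi hj h0 hl hr
    rcases List.mem_cons.mp hi with rfl | hi'
    · exact pvFold_sub n reach fr _ j (pvBody_complete n reach init i j hj h0 hl hr)
    · exact ih _ i j hi' hj h0 hl hr

theorem altLoop_nil (n : List Int) (reach : PySem.Set Int) (fuel : Nat) :
    altLoop n reach [] fuel = reach := by
  cases fuel <;> rfl

-- ---- B's loop computes exactly the reachable set ----
theorem altLoop_spec (n : List Int) (s : Int) :
    ∀ (fuel : Nat) (reach frontier : PySem.Set Int),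
      (∀ x ∈ frontier, x ∈ reach) →
      (∀ x ∈ reach, pvReach n s x) →
      s ∈ reach →
      (∀ x ∈ reach, x = s ∨ (0 ≤ x ∧ x < (n.length : Int))) →
      reach.Nodup →
      (∀ x ∈ reach, x ∈ frontier ∨ (∀ j, (j = x - pvVal n x ∨ j = x + pvVal n x) →
        0 ≤ j → j < (n.length : Int) → j ∈ reach)) →
      2 + (n.length + 1 - reach.length) ≤ fuel →
      (∀ x ∈ altLoop n reach frontier fuel, pvReach n s x) ∧
      s ∈ altLoop n reach frontier fuel ∧
      (∀ x ∈ altLoop n reach frontier fuel, ∀ j,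
        (j = x - pvVal n x ∨ j = x + pvVal n x) → 0 ≤ j → j < (n.length : Int) →
          j ∈ altLoop n reach frontier fuel) := by
  intro fuel
  induction fuel with
  | zero => intro reach frontier _ _ _ _ _ _ hfuel; omega
  | succ fuel ih =>
    intro reach frontier hsub hreach hs hrange hnd hclose hfuel
    match frontier with
    | [] =>
      rw [altLoop_nil]
      refine ⟨hreach, hs, ?_⟩
      intro x hx j hj h0 hl
      rcases hclose x hx with h1 | h1
      · simp at h1
      · exact h1 j hj h0 hl
    | f0 :: fr =>
      have hloopeq : altLoop n reach (f0 :: fr) (fuel + 1)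
          = altLoop n (PySem.Set.union reach (altExpand n (f0 :: fr) reach))
              (altExpand n (f0 :: fr) reach) fuel := rfl
      obtain ⟨new, hnc⟩ : ∃ t, altExpand n (f0 :: fr) reach = t := ⟨_, rfl⟩
      rw [hloopeq, hnc]
      have hnew_mem : ∀ x ∈ new, ∃ i ∈ (f0 :: fr), (x = i - pvVal n i ∨ x = i + pvVal n i) ∧
          0 ≤ x ∧ x < (n.length : Int) ∧ x ∉ reach := by
        intro x hx
        rw [← hnc] at hx
        rcases pvFold_mem n reach (f0 :: fr) PySem.Set.empty x hx with h1 | h1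
        · simp [PySem.Set.empty] at h1
        · exact h1
      have hnew_complete : ∀ i ∈ (f0 :: fr), ∀ j,
          (j = i - pvVal n i ∨ j = i + pvVal n i) → 0 ≤ j → j < (n.length : Int) →
          j ∉ reach → j ∈ new := by
        intro i hi j hj h0 hl hr
        rw [← hnc]
        exact pvFold_complete n reach (f0 :: fr) PySem.Set.empty i j hi hj h0 hl hr
      -- closure of the old reach, pushed into the union
      have hclose' : ∀ x ∈ reach, ∀ j, (j = x - pvVal n x ∨ j = x + pvVal n x) →
          0 ≤ j → j < (n.length : Int) → j ∈ PySem.Set.union reach new := by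
        intro x hx j hj h0 hl
        rcases hclose x hx with hxf | hxc
        · by_cases hjr : j ∈ reach
          · exact (PySem.Set.mem_union _ _ _).mpr (Or.inl hjr)
          · exact (PySem.Set.mem_union _ _ _).mpr
              (Or.inr (hnew_complete x hxf j hj h0 hl hjr))
        · exact (PySem.Set.mem_union _ _ _).mpr (Or.inl (hxc j hj h0 hl))
      cases new with
      | nil =>
        rw [altLoop_nil]
        have hru : PySem.Set.union reach [] = reach := rfl
        rw [hru] at hclose' ⊢
        exact ⟨hreach, hs, fun x hx j hj h0 hl => hclose' x hx j hj h0 hl⟩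
      | cons y ys =>
        refine ih (PySem.Set.union reach (y :: ys)) (y :: ys) ?_ ?_ ?_ ?_ ?_ ?_ ?_
        · intro x hx; exact (PySem.Set.mem_union _ _ _).mpr (Or.inr hx)
        · intro x hx
          rcases (PySem.Set.mem_union _ _ _).mp hx with h1 | h1
          · exact hreach x h1
          · obtain ⟨i, hi, hij, h0, hl, _⟩ := hnew_mem x h1
            exact pvReach.step i x (hreach i (hsub i hi)) hij h0 hl
        · exact (PySem.Set.mem_union _ _ _).mpr (Or.inl hs)
        · intro x hx
          rcases (PySem.Set.mem_union _ _ _).mp hx with h1 | h1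
          · exact hrange x h1
          · obtain ⟨_, _, _, h0, hl, _⟩ := hnew_mem x h1
            exact Or.inr ⟨h0, hl⟩
        · exact PySem.Set.nodup_union _ _ hnd
        · intro x hx
          rcases (PySem.Set.mem_union _ _ _).mp hx with h1 | h1
          · exact Or.inr (fun j hj h0 hl => hclose' x h1 j hj h0 hl)
          · exact Or.inl h1
        · -- fuel: reach grows strictly
          have hy : y ∈ (y :: ys : List Int) := List.mem_cons_self
          have hynr : y ∉ reach := by
            obtain ⟨_, _, _, _, _, h⟩ := hnew_mem y hy
            exact h
          have hgrow : reach.length + 1 ≤ (PySem.Set.union reach (y :: ys)).length :=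
            pvUnionLen reach (y :: ys) hnd y hy hynr
          have hbound : (PySem.Set.union reach (y :: ys)).length ≤ n.length + 1 := by
            refine pvNodupLenS _ n.length s (PySem.Set.nodup_union _ _ hnd) ?_
            intro x hx
            rcases (PySem.Set.mem_union _ _ _).mp hx with h1 | h1
            · exact hrange x h1
            · obtain ⟨_, _, _, h0, hl, _⟩ := hnew_mem x h1
              exact Or.inr ⟨h0, hl⟩
          omega

theorem altLoop_complete (n : List Int) (s : Int) (R : PySem.Set Int)
    (hs : s ∈ R)
    (hcl : ∀ x ∈ R, ∀ j, (j = x - pvVal n x ∨ j = x + pvVal n x) → 0 ≤ j →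
      j < (n.length : Int) → j ∈ R) :
    ∀ x, pvReach n s x → x ∈ R := by
  intro x hx
  induction hx with
  | base => exact hs
  | step c j hc hj h0 hl ih => exact hcl c ih j hj h0 hl

-- ===== VERDICT (by name: the statement is the Claim_ definition above) =====
theorem methodOne_spec : Claim_equal_methodOne := by
  unfold Claim_equal_methodOne
  intro n s _ _
  unfold Spec_methodOne
  by_cases hn : n.length = 0
  · simp [methodOne, methodOne_alt, hn]
  · rw [methodOne, methodOne_alt, if_neg hn, if_neg hn]
    have hadd : PySem.Set.add PySem.Set.empty s = [s] := rfl
    rw [hadd]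
    -- B's loop computes the reachable set
    have hspec := altLoop_spec n s (n.length + 2) [s] [s]
      (fun x hx => hx) (fun x hx => by rw [List.mem_singleton.mp hx]; exact pvReach.base)
      (by simp)
      (fun x hx => Or.inl (List.mem_singleton.mp hx))
      (List.nodup_cons.mpr ⟨List.not_mem_nil, List.nodup_nil⟩)
      (fun x hx => Or.inl hx)
      (by simp only [List.length_singleton]; omega)
    obtain ⟨hRsound, hRs, hRclose⟩ := hspec
    set R := altLoop n [s] [s] (n.length + 2) with hR
    have hRcomp := altLoop_complete n s R hRs hRclose
    cases hA : methodOneLoop n [s] PySem.Set.empty (n.length + 1) with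
    | true =>
      obtain ⟨x, hx, hx0⟩ := methodOneLoop_true n s (n.length + 1) [s] PySem.Set.empty
        (fun x hx => by rw [List.mem_singleton.mp hx]; exact pvReach.base) hA
      symm
      rw [List.any_eq_true]
      exact ⟨x, hRcomp x hx, by simpa using hx0⟩
    | false =>
      have hnone := methodOneLoop_false n s (n.length + 1) [s] PySem.Set.empty
        (fun x hx => by rw [List.mem_singleton.mp hx]; exact pvReach.base)
        (fun x hx => by simp [PySem.Set.empty] at hx)
        List.nodup_nil
        (fun x hx => by
          rcases hx with hx | rfl
          · simp [PySem.Set.empty] at hx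
          · exact Or.inl (by simp))
        (by simp only [List.length_singleton, PySem.Set.empty, List.length_nil]; omega)
        hA
      symm
      rw [List.any_eq_false]
      intro x hx
      simpa using hnone x (hRsound x hx)
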